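-- pv_equiv track=rewrite | github.com/asheeshkumar12/GFG_Code | icecream.py | findGoodPairs
-- ===== SOURCE A (Python) =====
-- def findGoodPairs(a, n, k):
--     # code here
--     d={}
--     for i in range(n):
--         number=a[i]
--         if number not in d:
--             d[number]=[]
--         d[number].append(i)
--     ansd=0
--     for ar in d.values():
--         for i in range(len(ar)):
--             lo,hi =i,len(ar)
--             while lo+1<hi:
--                 m=lo +(hi-lo)//2
--                 if ar[m]-ar[i]>=k:
--                     hi=m
--                 else:
--                     lo=m
--             ansd+=len(ar)-hi
--     return ansd
-- ===== SOURCE B (Python) =====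
-- def findGoodPairs(a, n, k):
--     groups = {}
--     for i in range(n):
--         groups.setdefault(a[i], []).append(i)
--     ans = 0
--     for ar in groups.values():
--         p = 0
--         for q in range(len(ar)):
--             while p < q and ar[p] <= ar[q] - k:
--                 p += 1
--             ans += p
--     return ans
-- ===== Notes on version B (the rewrite author's own statement) =====
-- stated objective: alternative
-- what changed: A runs a binary search over the group's position list for every element of every value group; B replaces all those binary searches by a single monotone two-pointer sweep per group, exploiting that the qualifying earlier positions form a growing prefix; it trades the search for threaded pointer state.
import Mathlib
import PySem

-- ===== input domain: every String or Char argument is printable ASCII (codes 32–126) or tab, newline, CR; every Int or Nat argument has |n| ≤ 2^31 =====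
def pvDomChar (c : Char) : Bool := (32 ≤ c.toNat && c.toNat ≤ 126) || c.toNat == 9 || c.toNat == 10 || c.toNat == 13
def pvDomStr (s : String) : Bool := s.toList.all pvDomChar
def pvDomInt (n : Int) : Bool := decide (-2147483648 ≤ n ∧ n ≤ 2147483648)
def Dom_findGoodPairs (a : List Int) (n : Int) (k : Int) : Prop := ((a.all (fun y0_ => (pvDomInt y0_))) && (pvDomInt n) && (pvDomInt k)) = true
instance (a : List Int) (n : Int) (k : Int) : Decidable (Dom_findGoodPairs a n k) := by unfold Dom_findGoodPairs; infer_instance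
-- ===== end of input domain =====

-- B replaces A's per-element binary search within each value group by a single monotone
-- two-pointer sweep per group; same return value on every input A accepts.

-- ===== PORT A =====
-- the grouping loop: for i in range(n): number=a[i]; if number not in d: d[number]=[]; d[number].append(i)
def pvBuildA (a : List Int) (n : Int) : PySem.Dict Int (List Int) :=
  (PySem.List.pyRange 0 n 1).foldl (fun d i =>
    let number := PySem.List.pyGetD a i 0
    let d' := if d.contains number then d else d.insert number ([] : List Int)
    d'.modify number [] (fun l => l ++ [i])) PySem.Dict.empty

-- the while-loop: lo,hi = i,len(ar); while lo+1<hi: m=lo+(hi-lo)//2; if ar[m]-ar[i]>=k: hi=m else lo=m; returns hi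
def pvLoopA (ar : List Int) (x k : Int) (lo hi : Int) : Int :=
  if _h : lo + 1 < hi then
    let m := lo + PySem.Int.floordiv (hi - lo) 2
    if k ≤ PySem.List.pyGetD ar m 0 - x then pvLoopA ar x k lo m else pvLoopA ar x k m hi
  else hi
termination_by (hi - lo).toNat
decreasing_by
  all_goals
    have h2 : PySem.Int.floordiv (hi - lo) 2 = (hi - lo) / 2 :=
      PySem.Int.floordiv_eq_ediv_of_pos (by norm_num)
    simp only [h2] at *
    omega

def findGoodPairs (a : List Int) (n : Int) (k : Int) : Int :=
  let d := pvBuildA a n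
  d.values.foldl (fun ansd ar =>
    (PySem.List.pyRange 0 (PySem.List.len ar) 1).foldl (fun ansd i =>
      ansd + (PySem.List.len ar - pvLoopA ar (PySem.List.pyGetD ar i 0) k i (PySem.List.len ar))) ansd) 0

-- ===== PORT B =====
-- grouping via groups.setdefault(a[i], []).append(i)  (= modify with default [])
def pvBuildB (a : List Int) (n : Int) : PySem.Dict Int (List Int) :=
  (PySem.List.pyRange 0 n 1).foldl (fun d i =>
    d.modify (PySem.List.pyGetD a i 0) [] (fun l => l ++ [i])) PySem.Dict.empty

-- the pointer advance: while p < q and ar[p] <= ar[q] - k: p += 1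
def pvLoopB (ar : List Int) (k : Int) (q p : Int) : Int :=
  if p < q ∧ PySem.List.pyGetD ar p 0 ≤ PySem.List.pyGetD ar q 0 - k then
    pvLoopB ar k q (p + 1)
  else p
termination_by (q - p).toNat
decreasing_by omega

def findGoodPairs_alt (a : List Int) (n : Int) (k : Int) : Int :=
  let d := pvBuildB a n
  d.values.foldl (fun ans ar =>
    ((PySem.List.pyRange 0 (PySem.List.len ar) 1).foldl (fun st q =>
      let p := pvLoopB ar k q st.1
      (p, st.2 + p)) ((0 : Int), ans)).2) 0

-- ===== PRECONDITION & SPEC =====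
-- Pre_ excludes exactly the inputs where A raises IndexError: a[i] with n > len(a).
def Pre_findGoodPairs (a : List Int) (n : Int) (_k : Int) : Prop := n ≤ (a.length : Int)
instance (a : List Int) (n : Int) (k : Int) : Decidable (Pre_findGoodPairs a n k) := by unfold Pre_findGoodPairs; infer_instance
def pvWitness_findGoodPairs : List Int × Int × Int := ([1, 1, 2, 1], 4, 2)

def Spec_findGoodPairs (a : List Int) (n : Int) (k : Int) (out : Int) : Prop := out = findGoodPairs_alt a n k
instance (a : List Int) (n : Int) (k : Int) (out : Int) : Decidable (Spec_findGoodPairs a n k out) := by unfold Spec_findGoodPairs; infer_instance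

-- ===== CLAIM (what is proved, stated in full; the proofs are below) =====
def Claim_equal_findGoodPairs : Prop := ∀ (a : List Int) (n : Int) (k : Int), Dom_findGoodPairs a n k → Pre_findGoodPairs a n k → Spec_findGoodPairs a n k (findGoodPairs a n k)

-- ===== LEMMAS AND PROOFS =====

-- the pair predicate both loops decide: positions p,q (p<q) in a group with ar[q]-ar[p] >= k
abbrev pvGood (ar : List Int) (k : Int) (p q : Nat) : Prop := ar.getD p 0 + k ≤ ar.getD q 0

-- monotonicity of positions within one group
lemma pvMono (ar : List Int) (hp : ar.Pairwise (· < ·)) :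
    ∀ p q : Nat, p ≤ q → q < ar.length → ar.getD p 0 ≤ ar.getD q 0 := by
  intro p q hpq hq
  rcases eq_or_lt_of_le hpq with h | h
  · subst h; exact le_refl _
  · rw [List.getD_eq_getElem ar 0 (lt_trans h hq), List.getD_eq_getElem ar 0 hq]
    exact le_of_lt ((List.pairwise_iff_getElem.mp hp) p q (lt_trans h hq) hq h)

lemma pvGetD_nat (ar : List Int) (j : Nat) (hj : j < ar.length) :
    PySem.List.pyGetD ar (j : Int) 0 = ar.getD j 0 := by
  rw [PySem.List.pyGetD_eq_getElem ar 0 (by omega) (by exact_mod_cast hj),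
    List.getD_eq_getElem ar 0 (by simpa using hj)]
  simp

-- A's binary search: characterisation of the returned hi
lemma pvLoopA_props (ar : List Int) (k : Int) (i : Nat)
    (hp : ar.Pairwise (· < ·)) :
    ∀ fuel : Nat, ∀ lo hi : Int, (hi - lo).toNat ≤ fuel →
      (i : Int) ≤ lo → lo < hi → hi ≤ (ar.length : Int) →
      (∀ j : Nat, i < j → (j : Int) ≤ lo → ¬ pvGood ar k i j) →
      (∀ j : Nat, hi ≤ (j : Int) → j < ar.length → pvGood ar k i j) →
      ((i : Int) < pvLoopA ar (ar.getD i 0) k lo hi ∧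
       pvLoopA ar (ar.getD i 0) k lo hi ≤ (ar.length : Int) ∧
       (∀ j : Nat, i < j → (j : Int) < pvLoopA ar (ar.getD i 0) k lo hi → ¬ pvGood ar k i j) ∧
       (∀ j : Nat, pvLoopA ar (ar.getD i 0) k lo hi ≤ (j : Int) → j < ar.length → pvGood ar k i j)) := by
  intro fuel
  induction fuel with
  | zero => intro lo hi hf h1 h2 h3 _ _; omega
  | succ fuel ih =>
    intro lo hi hf hilo hlohi hhi H1 H2
    rw [pvLoopA]
    by_cases hguard : lo + 1 < hi
    · have hfd : PySem.Int.floordiv (hi - lo) 2 = (hi - lo) / 2 :=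
        PySem.Int.floordiv_eq_ediv_of_pos (by norm_num)
      set m : Int := lo + PySem.Int.floordiv (hi - lo) 2 with hm
      have hmlo : lo < m := by rw [hm, hfd]; omega
      have hmhi : m < hi := by rw [hm, hfd]; omega
      have hm0 : 0 ≤ m := by omega
      have hmlen : m < (ar.length : Int) := by omega
      have hpg : PySem.List.pyGetD ar m 0 = ar.getD m.toNat 0 := by
        rw [PySem.List.pyGetD_eq_getElem ar 0 hm0 (by simpa using hmlen),
          List.getD_eq_getElem ar 0 (by omega)]
      simp only [dif_pos hguard]
      by_cases hg : k ≤ PySem.List.pyGetD ar m 0 - (ar.getD i 0)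
      · -- good at m : hi := m
        have hgoodm : pvGood ar k i m.toNat := by
          unfold pvGood; rw [← hpg]; omega
        simp only [if_pos hg]
        refine ih lo m (by rw [hfd] at hm; omega) hilo hmlo (by omega) H1 ?_
        intro j hmj hjlen
        have := pvMono ar hp m.toNat j (by omega) hjlen
        unfold pvGood at *; omega
      · -- bad at m : lo := m
        simp only [if_neg hg]
        refine ih m hi (by rw [hfd] at hm; omega) (by omega) hmhi hhi ?_ H2
        intro j hij hjm hgood
        have := pvMono ar hp j m.toNat (by omega) (by omega)
        unfold pvGood at *
        rw [hpg] at hg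
        omega
    · simp only [dif_neg hguard]
      refine ⟨by omega, by omega, ?_, H2⟩
      intro j hij hjhi
      exact H1 j hij (by omega)

-- A's inner step: len(ar) - hi  =  #{ j > i : pvGood i j }
lemma pvLoopA_count (ar : List Int) (k : Int) (i : Nat) (hi0 : i < ar.length)
    (hp : ar.Pairwise (· < ·)) :
    (ar.length : Int) - pvLoopA ar (ar.getD i 0) k i (ar.length : Int) =
      (((Finset.range ar.length).filter (fun j => i < j ∧ pvGood ar k i j)).card : Int) := by
  obtain ⟨hr1, hr2, hr3, hr4⟩ :=
    pvLoopA_props ar k i hp ((ar.length : Int) - i).toNat i (ar.length : Int)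
      (le_refl _) (le_refl _) (by omega) (le_refl _)
      (fun j hij hji => absurd hji (by omega))
      (fun j hLj hjL => absurd hjL (by omega))
  set r : Int := pvLoopA ar (ar.getD i 0) k i (ar.length : Int) with hrdef
  have hfilter : (Finset.range ar.length).filter (fun j => i < j ∧ pvGood ar k i j) =
      (Finset.range ar.length).filter (fun j => r.toNat ≤ j) := by
    ext j
    simp only [Finset.mem_filter, Finset.mem_range]
    constructor
    · rintro ⟨hjL, hij, hgood⟩
      refine ⟨hjL, ?_⟩
      by_contra hlt
      exact hr3 j hij (by omega) hgood
    · rintro ⟨hjL, hrj⟩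
      exact ⟨hjL, by omega, hr4 j (by omega) hjL⟩
  rw [hfilter]
  have hcard : ((Finset.range ar.length).filter (fun j => r.toNat ≤ j)).card =
      ar.length - r.toNat := by
    have : (Finset.range ar.length).filter (fun j => r.toNat ≤ j) =
        Finset.Ico r.toNat ar.length := by ext p; simp; omega
    rw [this, Nat.card_Ico]
  rw [hcard]
  have : r.toNat ≤ ar.length := by omega
  push_cast [this]
  omega

-- B's pointer advance: characterisation of the returned p
lemma pvLoopB_props (ar : List Int) (k : Int) (q : Nat) (hq : q < ar.length) :
    ∀ fuel : Nat, ∀ p : Int, ((q : Int) - p).toNat ≤ fuel →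
      0 ≤ p → p ≤ (q : Int) →
      (∀ p' : Nat, (p' : Int) < p → pvGood ar k p' q) →
      (0 ≤ pvLoopB ar k q p ∧ pvLoopB ar k q p ≤ (q : Int) ∧
       (∀ p' : Nat, (p' : Int) < pvLoopB ar k q p → pvGood ar k p' q) ∧
       ((pvLoopB ar k q p) < (q : Int) → ¬ pvGood ar k (pvLoopB ar k q p).toNat q)) := by
  intro fuel
  induction fuel with
  | zero =>
    intro p hf h0 hpq Hg
    have hpq' : p = (q : Int) := by omega
    have hnot : ¬(p < (q : Int) ∧
        PySem.List.pyGetD ar p 0 ≤ PySem.List.pyGetD ar (q : Int) 0 - k) :=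
      fun hc => absurd hc.1 (by omega)
    rw [pvLoopB, if_neg hnot]
    exact ⟨h0, hpq, fun p' hlt => Hg p' hlt, fun hlt => absurd hlt (by omega)⟩
  | succ fuel ih =>
    intro p hf h0 hpq Hg
    rw [pvLoopB]
    by_cases hg : p < (q : Int) ∧ PySem.List.pyGetD ar p 0 ≤ PySem.List.pyGetD ar (q : Int) 0 - k
    · simp only [if_pos hg]
      refine ih (p + 1) (by omega) (by omega) (by omega) ?_
      intro p' hp'
      by_cases hlt : (p' : Int) < p
      · exact Hg p' hlt
      · have hp'p : (p' : Int) = p := by omega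
        have hge : PySem.List.pyGetD ar p 0 = ar.getD p' 0 := by
          rw [← hp'p]; exact pvGetD_nat ar p' (by omega)
        have hqe : PySem.List.pyGetD ar (q : Int) 0 = ar.getD q 0 := pvGetD_nat ar q hq
        unfold pvGood
        rw [hge, hqe] at hg
        omega
    · simp only [if_neg hg]
      rcases not_and_or.mp hg with h | h
      · have : p = (q : Int) := by omega
        exact ⟨by omega, by omega, fun p' hlt => Hg p' hlt, fun h2 => absurd h2 (by omega)⟩
      · refine ⟨h0, hpq, fun p' hlt => Hg p' hlt, fun hlt hgood => ?_⟩
        have hge : PySem.List.pyGetD ar p 0 = ar.getD p.toNat 0 := by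
          have := pvGetD_nat ar p.toNat (by omega)
          rwa [Int.toNat_of_nonneg h0] at this
        have hqe : PySem.List.pyGetD ar (q : Int) 0 = ar.getD q 0 := pvGetD_nat ar q hq
        unfold pvGood at hgood
        rw [hge, hqe] at h
        omega

-- B's pointer value  =  #{ p < q : pvGood p q }
lemma pvLoopB_count (ar : List Int) (k : Int) (q : Nat) (hq : q < ar.length)
    (hp : ar.Pairwise (· < ·)) (p : Int) (h0 : 0 ≤ p) (hpq : p ≤ (q : Int))
    (hgood : ∀ p' : Nat, (p' : Int) < p → pvGood ar k p' q) :
    pvLoopB ar k q p = (((Finset.range q).filter (fun p' => pvGood ar k p' q)).card : Int) := by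
  obtain ⟨hr0, hrq, hr3, hr4⟩ :=
    pvLoopB_props ar k q hq ((q : Int) - p).toNat p (le_refl _) h0 hpq hgood
  set r : Int := pvLoopB ar k q p with hrdef
  have hfilter : (Finset.range q).filter (fun p' => pvGood ar k p' q) =
      Finset.range r.toNat := by
    ext p'
    simp only [Finset.mem_filter, Finset.mem_range]
    constructor
    · rintro ⟨hp'q, hg⟩
      by_contra hge
      have hrq' : r < (q : Int) := by omega
      have := pvMono ar hp r.toNat p' (by omega) (by omega)
      have hgr : pvGood ar k r.toNat q := by unfold pvGood at *; omega
      exact hr4 hrq' hgr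
    · intro hlt
      exact ⟨by omega, hr3 p' (by omega)⟩
  rw [hfilter, Finset.card_range]
  omega

-- B's inner fold accumulates those counts
lemma pvFoldB (ar : List Int) (k : Int) (hp : ar.Pairwise (· < ·)) :
    ∀ t : Nat, ∀ s : Nat, ar.length - s ≤ t → ∀ p ans : Int, s ≤ ar.length → 0 ≤ p → p ≤ (s : Int) →
      (∀ p' : Nat, (p' : Int) < p → s < ar.length → pvGood ar k p' s) →
      ((PySem.List.pyRange (s : Int) (ar.length : Int) 1).foldl (fun st q =>
          let p := pvLoopB ar k q st.1
          (p, st.2 + p)) (p, ans)).2 =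
        ans + ∑ q ∈ Finset.Ico s ar.length,
          ((((Finset.range q).filter (fun p' => pvGood ar k p' q)).card : Int)) := by
  intro t
  induction t with
  | zero =>
    intro s ht p ans hs h0 hps Hg
    have hsL : s = ar.length := by omega
    rw [PySem.List.pyRange_one_eq_nil (by omega)]
    simp [hsL]
  | succ t ih =>
    intro s ht p ans hs h0 hps Hg
    rcases eq_or_lt_of_le hs with hsL | hsL
    · rw [PySem.List.pyRange_one_eq_nil (by omega)]
      simp [hsL]
    · rw [PySem.List.pyRange_one_cons (by exact_mod_cast hsL)]
      simp only [List.foldl_cons]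
      obtain ⟨hr0, hrs, hr3, _⟩ :=
        pvLoopB_props ar k s hsL ((s : Int) - p).toNat p (le_refl _) h0 hps
          (fun p' h => Hg p' h hsL)
      have hcount := pvLoopB_count ar k s hsL hp p h0 hps (fun p' h => Hg p' h hsL)
      have hcast : (s : Int) + 1 = ((s + 1 : Nat) : Int) := by push_cast; ring
      rw [hcast]
      rw [ih (s + 1) (by omega) (pvLoopB ar k (s : Int) p) (ans + pvLoopB ar k (s : Int) p)
        (by omega) hr0 (by push_cast; omega)
        (fun p' hp' hs1 => by
          have hgs := hr3 p' hp'
          have hmono := pvMono ar hp s (s + 1) (by omega) hs1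
          unfold pvGood at *; omega)]
      rw [Finset.sum_eq_sum_Ico_succ_bot hsL]
      rw [hcount]
      ring

-- the double-count swap: Σ_i #{j>i good} = Σ_q #{p<q good}
lemma pvSwap (ar : List Int) (k : Int) :
    (∑ i ∈ Finset.range ar.length,
        (((Finset.range ar.length).filter (fun j => i < j ∧ pvGood ar k i j)).card : Int)) =
      ∑ q ∈ Finset.range ar.length,
        (((Finset.range q).filter (fun p' => pvGood ar k p' q)).card : Int) := by
  have hnat : (∑ i ∈ Finset.range ar.length,
        ((Finset.range ar.length).filter (fun j => i < j ∧ pvGood ar k i j)).card) =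
      ∑ q ∈ Finset.range ar.length,
        ((Finset.range q).filter (fun p' => pvGood ar k p' q)).card := by
    simp only [Finset.card_filter]
    rw [Finset.sum_comm]
    refine Finset.sum_congr rfl (fun q hq => ?_)
    have hqL : q < ar.length := Finset.mem_range.mp hq
    rw [show (Finset.range q) = (Finset.range ar.length).filter (fun i => i < q) by
      ext i; simp; omega]
    rw [Finset.sum_filter]
    refine Finset.sum_congr rfl (fun i _ => ?_)
    by_cases h1 : i < q <;> by_cases h2 : pvGood ar k i q <;> simp [h1]
  rw [← Nat.cast_sum, ← Nat.cast_sum, hnat]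

-- per-group: A's inner double loop = B's inner sweep, for a strictly increasing group
lemma pvPerGroup (ar : List Int) (k : Int) (hp : ar.Pairwise (· < ·)) (ans : Int) :
    (PySem.List.pyRange 0 (PySem.List.len ar) 1).foldl (fun ansd i =>
        ansd + (PySem.List.len ar - pvLoopA ar (PySem.List.pyGetD ar i 0) k i (PySem.List.len ar))) ans =
      ((PySem.List.pyRange 0 (PySem.List.len ar) 1).foldl (fun st q =>
        let p := pvLoopB ar k q st.1
        (p, st.2 + p)) ((0 : Int), ans)).2 := by
  simp only [PySem.List.len_eq]
  -- right side via pvFoldB (s = 0)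
  have hF := pvFoldB ar k hp ar.length 0 (by omega) 0 ans (by omega) (le_refl _) (by omega)
    (fun p' h _ => absurd h (by omega))
  simp only [Nat.cast_zero] at hF
  rw [hF]
  -- left side: fold of additions = sum
  rw [PySem.List.pyRange_zero_natCast ar.length]
  simp only [List.foldl_map]
  rw [PySem.List.foldl_add _ (fun i : Nat =>
    (ar.length : Int) - pvLoopA ar (PySem.List.pyGetD ar (i : Int) 0) k (i : Int) (ar.length : Int)) ans]
  have hsum : ((List.range ar.length).map (fun i : Nat =>
      (ar.length : Int) - pvLoopA ar (PySem.List.pyGetD ar (i : Int) 0) k (i : Int) (ar.length : Int))).sum =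
      ∑ i ∈ Finset.range ar.length,
        ((ar.length : Int) - pvLoopA ar (PySem.List.pyGetD ar (i : Int) 0) k (i : Int) (ar.length : Int)) := rfl
  rw [hsum]
  have hmain : (∑ i ∈ Finset.range ar.length,
      ((ar.length : Int) - pvLoopA ar (PySem.List.pyGetD ar (i : Int) 0) k (i : Int) (ar.length : Int))) =
      ∑ q ∈ Finset.range ar.length,
        (((Finset.range q).filter (fun p' => pvGood ar k p' q)).card : Int) := by
    rw [← pvSwap ar k]
    refine Finset.sum_congr rfl (fun i hi => ?_)
    have hiL : i < ar.length := Finset.mem_range.mp hi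
    rw [pvGetD_nat ar i hiL]
    exact pvLoopA_count ar k i hiL hp
  rw [hmain, Finset.range_eq_Ico]

-- the two grouping loops build the same dict
lemma pvBuild_eq (a : List Int) (n : Int) : pvBuildA a n = pvBuildB a n := by
  unfold pvBuildA pvBuildB
  apply PySem.List.foldl_congr_mem
  intro d i _
  by_cases hc : d.contains (PySem.List.pyGetD a i 0)
  · simp [hc]
  · simp only [hc, Bool.false_eq_true, if_false]
    simp [PySem.Dict.modify, PySem.Dict.getD_insert_self, PySem.Dict.insert_insert_self,
      PySem.Dict.getD_of_not_contains d _ (by simpa using hc)]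

-- every group list is strictly increasing
lemma pvValues_pairwise (a : List Int) (n : Int) :
    ∀ ar ∈ (pvBuildB a n).values, ar.Pairwise (· < ·) := by
  intro ar har
  have hnd : (pvBuildB a n).keys.Nodup := by
    unfold pvBuildB
    exact PySem.Dict.nodup_keys_foldl_modify_key _ (fun i => PySem.List.pyGetD a i 0) _
      (fun _ x l => l ++ [x]) _ PySem.Dict.nodup_keys_empty
  simp only [PySem.Dict.values, List.mem_map] at har
  obtain ⟨⟨c, v⟩, hmem, hv⟩ := har
  have hget : (pvBuildB a n).getD c [] = ar := by
    rw [PySem.Dict.getD_of_mem_items _ hmem hnd]; exact hv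
  have hB : (pvBuildB a n).getD c [] =
      PySem.Dict.empty.getD c [] ++
        (((PySem.List.pyRange 0 n 1).map (fun i => (PySem.List.pyGetD a i 0, i))).filter
          (fun p => p.1 == c)).map (fun x => x.2) := by
    have h0 := PySem.Dict.getD_foldl_modify_append
      ((PySem.List.pyRange 0 n 1).map (fun i => (PySem.List.pyGetD a i 0, i)))
      (PySem.Dict.empty : PySem.Dict Int (List Int)) c
    simp only [List.foldl_map] at h0
    unfold pvBuildB
    exact h0
  rw [hget] at hB
  have : ar = (PySem.List.pyRange 0 n 1).filter (fun i => PySem.List.pyGetD a i 0 == c) := by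
    rw [hB, List.filter_map]
    simp [List.map_map, Function.comp_def]
  rw [this]
  exact (PySem.List.pairwise_lt_pyRange_one 0 n).sublist (List.filter_sublist)

-- ===== VERDICT (by name: the statement is the Claim_ definition above) =====
theorem findGoodPairs_spec : Claim_equal_findGoodPairs := by
  intro a n k _hdom _hpre
  unfold Spec_findGoodPairs findGoodPairs findGoodPairs_alt
  rw [pvBuild_eq]
  exact PySem.List.foldl_congr_mem _ _ _ _
    (fun ans ar har => pvPerGroup ar k (pvValues_pairwise a n ar har) ans)
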